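-- pv_equiv track=rewrite | github.com/wannabethere/asthera | complianceskill/app/ingestion/enrich_control_taxonomy.py | group_controls_by_domain
-- ===== SOURCE A (Python) =====
-- from typing import Any, Dict, List, Optional
-- from collections import defaultdict
--
-- def extract_control_code(control: Dict[str, Any]) -> str:
--     """Extract control code from control dict."""
--     return control.get("control_id") or control.get("code") or control.get("id", "")
--
-- def group_controls_by_domain(controls: List[Dict[str, Any]]) -> Dict[str, List[Dict[str, Any]]]:
--     """Group controls by domain prefix (e.g., CC7.x, CC8.x)."""
--     groups = defaultdict(list)
--
--     for control in controls:
--         code = extract_control_code(control)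
--         if not code:
--             continue
--
--         # Extract domain prefix (e.g., "CC7" from "CC7.1" or "164.308" from "164.308(a)(1)")
--         parts = code.split(".")
--         if len(parts) > 0:
--             domain_prefix = parts[0]
--             # For HIPAA-style codes like "164.308(a)(1)", use "164.308" as domain
--             if "(" in domain_prefix:
--                 domain_prefix = domain_prefix.split("(")[0]
--             groups[domain_prefix].append(control)
--         else:
--             groups[code].append(control)
--
--     return dict(groups)
-- ===== SOURCE B (Python) =====
-- def group_controls_by_domain(controls):
--     """Group controls by domain prefix: key every control once (first truthy of
--     control_id/code/id, cut at the first '.' or '('), then gather each distinct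
--     key's controls with a per-key filter pass (dict.fromkeys keeps first-seen
--     key order)."""
--     def domain_key(control):
--         for field in ("control_id", "code", "id"):
--             value = control.get(field)
--             if value:
--                 i = 0
--                 while i < len(value) and value[i] not in ".(":
--                     i += 1
--                 return value[:i]
--         return None
--
--     keyed = [(domain_key(c), c) for c in controls]
--     keyed = [(k, c) for k, c in keyed if k is not None]
--     keys = dict.fromkeys(k for k, _ in keyed)
--     return {k: [c for kk, c in keyed if kk == k] for k in keys}
-- ===== Notes on version B (the rewrite author's own statement) =====
-- stated objective: alternative
-- what changed: Replaces the incremental defaultdict-append accumulation (or-chain code extraction, split('.')/split('(') prefixing, per-control dict mutation) with a key-then-gather decomposition: each control is keyed once by scanning its first truthy code field up to the first '.' or '(', then one list per distinct key (dict.fromkeys order) is built by a per-key filter over the keyed pairs.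
import Mathlib
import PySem

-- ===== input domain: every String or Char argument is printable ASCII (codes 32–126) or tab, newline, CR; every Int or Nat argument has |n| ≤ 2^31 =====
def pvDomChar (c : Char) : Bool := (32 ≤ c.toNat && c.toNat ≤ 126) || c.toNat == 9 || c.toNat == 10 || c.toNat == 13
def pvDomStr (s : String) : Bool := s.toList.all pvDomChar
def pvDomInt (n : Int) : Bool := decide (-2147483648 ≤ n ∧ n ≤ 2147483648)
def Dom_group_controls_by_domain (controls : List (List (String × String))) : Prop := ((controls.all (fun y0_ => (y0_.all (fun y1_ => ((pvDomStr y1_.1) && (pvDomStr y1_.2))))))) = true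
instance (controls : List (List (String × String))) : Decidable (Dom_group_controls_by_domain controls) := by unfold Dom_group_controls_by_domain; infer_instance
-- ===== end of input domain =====

-- B replaces A's incremental defaultdict-append accumulation with a key-then-gather
-- decomposition (key each control once, then one filter pass per distinct key).

-- ===== PORT A =====
-- control.get(k): first match on the assoc-list dict
def pvGetA (control : List (String × String)) (k : String) : Option String :=
  (PySem.Dict.mk control).get? k

-- `x or y or control.get("id","")`: first truthy (nonempty) value, else the final default
def extract_control_code (control : List (String × String)) : String :=
  match pvGetA control "control_id" with
  | some s =>
      if s ≠ "" then s
      else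
        match pvGetA control "code" with
        | some t => if t ≠ "" then t else (pvGetA control "id").getD ""
        | none => (pvGetA control "id").getD ""
  | none =>
      match pvGetA control "code" with
      | some t => if t ≠ "" then t else (pvGetA control "id").getD ""
      | none => (pvGetA control "id").getD ""

-- the body of A's for-loop (one iteration over `control`, updating `groups`)
def stepA (groups : PySem.Dict String (List (List (String × String))))
    (control : List (String × String)) : PySem.Dict String (List (List (String × String))) :=
  let code := extract_control_code control
  if code = "" then groups                                -- if not code: continue
  else
    let parts := (PySem.Str.split? code ".").getD []      -- sep "." is nonempty: never raises
    if parts.length > 0 then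
      let dp := parts.headI                               -- parts[0], guarded by the length test
      let dp := if PySem.Str.isIn "(" dp
        then ((PySem.Str.split? dp "(").getD []).headI    -- dp.split("(")[0]; split is never empty
        else dp
      groups.modify dp [] (· ++ [control])                -- defaultdict: groups[dp].append(control)
    else
      groups.modify code [] (· ++ [control])

def group_controls_by_domain (controls : List (List (String × String))) :
    List (String × List (List (String × String))) :=
  (controls.foldl stepA PySem.Dict.empty).items

-- ===== PORT B =====
-- first truthy of the three fields, cut at the first '.' or '(' (Source B's while-scan + slice
-- computes exactly the longest delimiter-free prefix: ported as takeWhile, exact)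
def domainKeyGo (control : List (String × String)) : List String → Option String
  | [] => none
  | f :: fs =>
      match (PySem.Dict.mk control).get? f with
      | some v =>
          if v ≠ "" then
            some (String.ofList (v.toList.takeWhile (fun ch => !(ch == '.' || ch == '('))))
          else domainKeyGo control fs
      | none => domainKeyGo control fs

def domainKey (control : List (String × String)) : Option String :=
  domainKeyGo control ["control_id", "code", "id"]

def group_controls_by_domain_alt (controls : List (List (String × String))) :
    List (String × List (List (String × String))) :=
  let keyed := (controls.map (fun c => (domainKey c, c))).filterMap
      (fun p => match p.1 with | some k => some (k, p.2) | none => none)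
  let keys := PySem.List.dedup (keyed.map (·.1))
  keys.map (fun k => (k, (keyed.filter (fun p => p.1 == k)).map (·.2)))

-- ===== PRECONDITION & SPEC =====
def Spec_group_controls_by_domain (controls : List (List (String × String))) (out : List (String × List (List (String × String)))) : Prop := out = group_controls_by_domain_alt controls
instance (controls : List (List (String × String))) (out : List (String × List (List (String × String)))) : Decidable (Spec_group_controls_by_domain controls out) := by unfold Spec_group_controls_by_domain; infer_instance

-- ===== CLAIM (what is proved, stated in full; the proofs are below) =====
def Claim_equal_group_controls_by_domain : Prop := ∀ (controls : List (List (String × String))), Dom_group_controls_by_domain controls → Spec_group_controls_by_domain controls (group_controls_by_domain controls)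

-- ===== LEMMAS AND PROOFS =====

-- the accumulator of splitOn.go distributes out
theorem splitOn_go_acc (sep : List Char) (fuel : Nat) (l cur : List Char) (acc : List (List Char)) :
    PySem.Chars.splitOn.go sep fuel l cur acc = acc.reverse ++ PySem.Chars.splitOn.go sep fuel l cur [] := by
  induction fuel generalizing l cur acc with
  | zero => simp [PySem.Chars.splitOn.go]
  | succ fuel ih =>
    cases l with
    | nil => simp [PySem.Chars.splitOn.go]
    | cons c rest =>
      simp only [PySem.Chars.splitOn.go]
      split
      · rw [ih _ _ (cur.reverse :: acc), ih _ _ [cur.reverse]]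
        simp
      · exact ih _ _ acc

-- the first piece of a single-character split is the delimiter-free prefix
theorem splitOn_go_first (d : Char) (fuel : Nat) (l cur : List Char) (h : l.length ≤ fuel) :
    ∃ rest, PySem.Chars.splitOn.go [d] fuel l cur [] = (cur.reverse ++ l.takeWhile (· != d)) :: rest := by
  induction fuel generalizing l cur with
  | zero =>
    have : l = [] := List.eq_nil_of_length_eq_zero (Nat.le_zero.mp h)
    subst this
    exact ⟨[], by simp [PySem.Chars.splitOn.go]⟩
  | succ fuel ih =>
    cases l with
    | nil => exact ⟨[], by simp [PySem.Chars.splitOn.go]⟩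
    | cons c rest =>
      simp only [PySem.Chars.splitOn.go]
      by_cases hc : c = d
      · subst hc
        have hpre : [c].isPrefixOf (c :: rest) = true := by simp [List.isPrefixOf]
        rw [if_pos hpre, splitOn_go_acc]
        refine ⟨PySem.Chars.splitOn.go [c] fuel (List.drop 1 (c :: rest)) [] [], ?_⟩
        simp
      · have hpre : [d].isPrefixOf (c :: rest) = false := by
          have hdc : ¬ d = c := fun h => hc h.symm
          simp [List.isPrefixOf, hdc]
        rw [if_neg (by simp [hpre])]
        obtain ⟨r, hr⟩ := ih rest (c :: cur) (by simpa using Nat.le_of_succ_le_succ h)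
        refine ⟨r, ?_⟩
        rw [hr]
        simp [hc]

theorem splitOn_first (d : Char) (cs : List Char) :
    ∃ rest, PySem.Chars.splitOn cs [d] = (cs.takeWhile (· != d)) :: rest := by
  obtain ⟨r, hr⟩ := splitOn_go_first d (cs.length + 1) cs [] (Nat.le_succ _)
  exact ⟨r, by simpa [PySem.Chars.splitOn] using hr⟩

theorem split?_first (d : Char) (sep : String) (hsep : sep.toList = [d]) (s : String) :
    ∃ rest, (PySem.Str.split? s sep).getD []
      = String.ofList (s.toList.takeWhile (· != d)) :: rest := by
  obtain ⟨r, hr⟩ := splitOn_first d s.toList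
  refine ⟨r.map String.ofList, ?_⟩
  simp [PySem.Str.split?, PySem.Chars.split?, hsep, hr]

theorem parts_len_pos (d : Char) (sep : String) (hsep : sep.toList = [d]) (s : String) :
    0 < ((PySem.Str.split? s sep).getD []).length := by
  obtain ⟨r, hr⟩ := split?_first d sep hsep s
  simp [hr]

-- A's two-stage prefix (split('.')[0], then split('(')[0] when '(' occurs) is B's takeWhile
theorem prefix_eq (s : String) :
    (if PySem.Str.isIn "(" (((PySem.Str.split? s ".").getD []).headI) = true
     then ((PySem.Str.split? (((PySem.Str.split? s ".").getD []).headI) "(").getD []).headI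
     else ((PySem.Str.split? s ".").getD []).headI)
    = String.ofList (s.toList.takeWhile (fun ch => !(ch == '.' || ch == '('))) := by
  obtain ⟨r1, h1⟩ := split?_first '.' "." (by decide) s
  rw [h1]
  simp only [List.headI]
  have hpred : (fun ch => !(ch == '.' || ch == '(')) =
      (fun a : Char => decide ((a != '(') = true ∧ (a != '.') = true)) := by
    funext ch
    by_cases h1 : ch = '.' <;> by_cases h2 : ch = '(' <;> simp [h1, h2]
  have hcomb : s.toList.takeWhile (fun ch => !(ch == '.' || ch == '(')) =
      (s.toList.takeWhile (· != '.')).takeWhile (· != '(') := by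
    rw [hpred, ← List.takeWhile_takeWhile]
  rw [hcomb]
  split
  · obtain ⟨r2, h2⟩ := split?_first '(' "(" (by decide) (String.ofList (s.toList.takeWhile (· != '.')))
    rw [String.toList_ofList] at h2
    rw [h2]
  · next hno =>
    have hno' : PySem.Chars.isIn ['('] (s.toList.takeWhile (· != '.')) = false := by
      have := Bool.not_eq_true _ |>.mp hno
      simpa [PySem.Str.isIn] using this
    have hmem : ∀ x ∈ s.toList.takeWhile (· != '.'), (x != '(') = true := by
      intro x hx
      by_contra hbad
      have hx' : x = '(' := by simpa using hbad
      subst hx'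
      obtain ⟨u, v, huv⟩ := List.append_of_mem hx
      exact ((PySem.Chars.isIn_eq_false_iff _ _).mp hno') ⟨u, v, by simp [huv]⟩
    rw [List.takeWhile_eq_self_iff.mpr hmem]

-- B's key is A's extracted code, keyed, when that code is truthy
theorem key_eq (c : List (String × String)) :
    domainKey c = if extract_control_code c = "" then none
      else some (String.ofList ((extract_control_code c).toList.takeWhile (fun ch => !(ch == '.' || ch == '(')))) := by
  unfold domainKey domainKeyGo extract_control_code pvGetA
  rcases h1 : (PySem.Dict.mk c).get? "control_id" with _ | v1 <;>
    rcases h2 : (PySem.Dict.mk c).get? "code" with _ | v2 <;>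
      rcases h3 : (PySem.Dict.mk c).get? "id" with _ | v3 <;>
        simp [domainKeyGo, h2, h3] <;> split_ifs <;> simp_all

-- A's loop step, expressed through B's key
theorem stepA_eq (d : PySem.Dict String (List (List (String × String)))) (c : List (String × String)) :
    stepA d c = match domainKey c with
      | none => d
      | some k => d.modify k [] (· ++ [c]) := by
  rw [key_eq c]
  by_cases h : extract_control_code c = ""
  · simp [stepA, h]
  · have hp := parts_len_pos '.' "." (by decide) (extract_control_code c)
    simp only [stepA, if_neg h]
    rw [if_pos hp, prefix_eq]

-- A's whole fold is the fold over B's keyed pairs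
theorem foldA_eq (controls : List (List (String × String)))
    (d : PySem.Dict String (List (List (String × String)))) :
    controls.foldl stepA d
      = ((controls.map (fun c => (domainKey c, c))).filterMap
          (fun p => match p.1 with | some k => some (k, p.2) | none => none)).foldl
          (fun d p => d.modify p.1 [] (· ++ [p.2])) d := by
  induction controls generalizing d with
  | nil => rfl
  | cons c cs ih =>
    simp only [List.map_cons, List.filterMap_cons, List.foldl_cons]
    rcases h : domainKey c with _ | k <;>
      simp only [stepA_eq, h] <;> exact ih _

theorem group_controls_by_domain_spec : Claim_equal_group_controls_by_domain := by
  intro controls _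
  unfold Spec_group_controls_by_domain group_controls_by_domain group_controls_by_domain_alt
  rw [foldA_eq]
  set keyed := (controls.map (fun c => (domainKey c, c))).filterMap
      (fun p => match p.1 with | some k => some (k, p.2) | none => none) with hk
  have hnd : (keyed.foldl (fun d p => d.modify p.1 [] (· ++ [p.2]))
      (PySem.Dict.empty : PySem.Dict String (List (List (String × String))))).keys.Nodup := by
    exact PySem.Dict.nodup_keys_foldl_modify_key keyed Prod.fst [] (fun _ p v => v ++ [p.2]) _ (by simp [PySem.Dict.empty, PySem.Dict.keys])
  rw [PySem.Dict.items_eq_map_keys _ hnd []]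
  rw [PySem.Dict.keys_foldl_modify_key keyed Prod.fst [] (fun _ p v => v ++ [p.2])]
  have hkeys : PySem.Set.update (PySem.Dict.empty : PySem.Dict String (List (List (String × String)))).keys (keyed.map Prod.fst)
      = PySem.List.dedup (keyed.map (·.1)) := rfl
  rw [hkeys]
  refine List.map_congr_left ?_
  intro k hkmem
  rw [PySem.Dict.getD_foldl_modify_append keyed PySem.Dict.empty k]
  simp [PySem.Dict.getD, PySem.Dict.get?, PySem.Dict.empty]
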